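-- pv_equiv track=rewrite | github.com/ColarDriver/colarclaw | src/config/env.py | _is_path_changed
-- ===== SOURCE A (Python) =====
-- def _parent_path(path: str) -> str:
--     """Get the parent path."""
--     if not path:
--         return ""
--     if path.endswith("]"):
--         idx = path.rfind("[")
--         return path[:idx] if idx > 0 else ""
--     idx = path.rfind(".")
--     return path[:idx] if idx >= 0 else ""
--
-- def _is_path_changed(path: str, changed_paths: set[str]) -> bool:
--     """Check if a path or any ancestor was changed."""
--     if path in changed_paths:
--         return True
--     current = _parent_path(path)
--     while current:
--         if current in changed_paths:
--             return True
--         current = _parent_path(current)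
--     return "" in changed_paths
-- ===== SOURCE B (Python) =====
-- def _is_path_changed(path: str, changed_paths: set[str]) -> bool:
--     """Check if a path or any ancestor was changed.
--
--     Single right-to-left scan: collect every ancestor prefix in one pass
--     (tracking which cut character -- '[' or '.' -- is currently sought),
--     then test membership of all prefixes at once.
--     """
--     prefixes = [path]
--     if path:
--         target = '[' if path[-1] == ']' else '.'
--         i = len(path) - 1
--         while i > 0:
--             if path[i] == target:
--                 prefixes.append(path[:i])
--                 target = '[' if path[i - 1] == ']' else '.'
--             i -= 1
--     prefixes.append("")
--     return any(p in changed_paths for p in prefixes)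
-- ===== Notes on version B (the rewrite author's own statement) =====
-- stated objective: alternative
-- what changed: A repeatedly calls _parent_path (endswith + rfind + slice per ancestor) to walk the chain back-to-front; B makes one right-to-left character scan over the path that collects every ancestor prefix in a single pass (tracking whether the next cut character sought is '[' or '.'), then tests membership of all prefixes with any().
import Mathlib
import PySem

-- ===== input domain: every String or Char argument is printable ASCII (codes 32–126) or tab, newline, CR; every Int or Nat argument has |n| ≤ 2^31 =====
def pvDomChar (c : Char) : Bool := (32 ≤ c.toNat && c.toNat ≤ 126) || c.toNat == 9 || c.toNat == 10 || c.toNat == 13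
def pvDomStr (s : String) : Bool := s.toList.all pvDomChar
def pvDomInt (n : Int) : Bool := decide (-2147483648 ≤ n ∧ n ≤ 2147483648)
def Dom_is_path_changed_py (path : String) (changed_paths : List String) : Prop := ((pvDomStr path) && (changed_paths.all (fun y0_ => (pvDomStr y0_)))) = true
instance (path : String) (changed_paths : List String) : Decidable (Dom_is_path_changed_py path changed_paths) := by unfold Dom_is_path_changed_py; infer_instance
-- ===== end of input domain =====

-- B replaces A's repeated rfind-based parent-chain walk by a single right-to-left
-- character scan that collects all ancestor prefixes in one pass (objective: alternative).

-- ===== PORT A =====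
-- rfind characterisation for a single-character needle (needed by the port's
-- termination proof, hence stated above the port; cited in decreasing_by).
theorem pv_isPrefixOf_single (c : Char) (t : List Char) :
    [c].isPrefixOf t = (t.head? == some c) := by
  cases t with
  | nil => rfl
  | cons x xs =>
    simp only [List.isPrefixOf, Bool.and_true, List.head?_cons]
    rw [Bool.eq_iff_iff, beq_iff_eq, beq_iff_eq, Option.some_inj, eq_comm]

theorem pv_rfind_go_single (s : List Char) (c : Char) : ∀ k : Nat,
    (PySem.Chars.rfind.go s [c] k = -1 ∧ ∀ j ≤ k, s[j]? ≠ some c)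
  ∨ (∃ m : Nat, m ≤ k ∧ PySem.Chars.rfind.go s [c] k = (m : Int) ∧ s[m]? = some c ∧
       ∀ j, m < j → j ≤ k → s[j]? ≠ some c) := by
  intro k
  induction k with
  | zero =>
    by_cases h : s[0]? = some c
    · right; refine ⟨0, le_refl 0, ?_, h, by omega⟩
      have : [c].isPrefixOf s = true := by
        rw [pv_isPrefixOf_single]
        cases s <;> simp_all
      simp [PySem.Chars.rfind.go, this]
    · left
      constructor
      · have : [c].isPrefixOf s = false := by
          rw [pv_isPrefixOf_single]
          cases s <;> simp_all
        simp [PySem.Chars.rfind.go, this]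
      · intro j hj; interval_cases j; exact h
  | succ n ih =>
    have hstep : PySem.Chars.rfind.go s [c] (n+1)
        = if [c].isPrefixOf (s.drop (n+1)) then ((n : Int)+1) else PySem.Chars.rfind.go s [c] n := by
      simp [PySem.Chars.rfind.go]
    have hpre : [c].isPrefixOf (s.drop (n+1)) = (s[n+1]? == some c) := by
      rw [pv_isPrefixOf_single, List.head?_drop]
    by_cases h : s[n+1]? = some c
    · right
      refine ⟨n+1, le_refl _, ?_, h, by omega⟩
      rw [hstep, hpre]; simp [h]
    · have hgo : PySem.Chars.rfind.go s [c] (n+1) = PySem.Chars.rfind.go s [c] n := by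
        rw [hstep, hpre]; simp [h]
      rcases ih with ⟨h1, h2⟩ | ⟨m, hm, he, hc, hmax⟩
      · left
        refine ⟨by rw [hgo]; exact h1, ?_⟩
        intro j hj
        rcases Nat.lt_or_ge j (n+1) with hj' | hj'
        · exact h2 j (by omega)
        · have : j = n+1 := by omega
          subst this; exact h
      · right
        refine ⟨m, by omega, by rw [hgo]; exact he, hc, ?_⟩
        intro j hmj hj
        rcases Nat.lt_or_ge j (n+1) with hj' | hj'
        · exact hmax j hmj (by omega)
        · have : j = n+1 := by omega
          subst this; exact h

theorem pv_rfind_single (s : List Char) (c : Char) :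
    (PySem.Chars.rfind s [c] = -1 ∧ ∀ j : Nat, s[j]? ≠ some c)
  ∨ (∃ m : Nat, m < s.length ∧ PySem.Chars.rfind s [c] = (m : Int) ∧ s[m]? = some c ∧
       ∀ j : Nat, m < j → s[j]? ≠ some c) := by
  rcases pv_rfind_go_single s c s.length with ⟨h1, h2⟩ | ⟨m, hm, he, hc, hmax⟩
  · left
    refine ⟨h1, fun j => ?_⟩
    by_cases hj : j ≤ s.length
    · exact h2 j hj
    · rw [List.getElem?_eq_none (l := s) (by omega)]; simp
  · right
    have hmlt : m < s.length := by
      by_contra hge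
      rw [List.getElem?_eq_none (by omega)] at hc
      simp at hc
    refine ⟨m, hmlt, he, hc, fun j hmj => ?_⟩
    by_cases hj : j ≤ s.length
    · exact hmax j hmj hj
    · rw [List.getElem?_eq_none (l := s) (by omega)]; simp

-- _parent_path, transliterated (over the code points of the string)
def pvParentPath (path : List Char) : List Char :=
  if path = [] then []
  else if PySem.Chars.endswith path [']'] then
    let idx := PySem.Chars.rfind path ['[']
    if 0 < idx then PySem.Chars.slice path none (some idx) else []
  else
    let idx := PySem.Chars.rfind path ['.']
    if 0 ≤ idx then PySem.Chars.slice path none (some idx) else []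

theorem pvParentPath_length_lt (path : List Char) (h : path ≠ []) :
    (pvParentPath path).length < path.length := by
  have hlen : 0 < path.length := List.length_pos_of_ne_nil h
  unfold pvParentPath
  simp only [h, if_false]
  split
  · rcases pv_rfind_single path '[' with ⟨h1, _⟩ | ⟨m, hm, he, _, _⟩
    · simp [h1, hlen]
    · rw [he]
      split
      · rw [PySem.Chars.slice_eq_listSlice, PySem.List.slice_to _ (by positivity)]
        simp; omega
      · simpa using hlen
  · rcases pv_rfind_single path '.' with ⟨h1, _⟩ | ⟨m, hm, he, _, _⟩
    · rw [h1]; simpa using hlen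
    · rw [he]
      split
      · rw [PySem.Chars.slice_eq_listSlice, PySem.List.slice_to _ (by positivity)]
        simp; omega
      · simpa using hlen

-- the while loop of _is_path_changed ('return "" in changed_paths' folded into the exit)
def pvLoopA (changed : List (List Char)) (cur : List Char) : Bool :=
  if h : cur = [] then changed.contains []
  else if changed.contains cur then true
  else pvLoopA changed (pvParentPath cur)
termination_by cur.length
decreasing_by exact pvParentPath_length_lt cur h

def is_path_changed_py (path : String) (changed_paths : List String) : Bool :=
  let s := path.toList
  let ch := changed_paths.map String.toList
  if ch.contains s then true
  else pvLoopA ch (pvParentPath s)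

-- ===== PORT B =====
-- the while loop of B: one right-to-left scan collecting ancestor prefixes,
-- tracking the cut character currently sought
def pvScanGo (s : List Char) : Nat → Char → List (List Char) → List (List Char)
  | 0, _, acc => acc
  | j+1, t, acc =>
    if PySem.List.pyGet? s ((j+1 : Nat) : Int) = some t then
      pvScanGo s j (if PySem.List.pyGet? s ((j : Nat) : Int) = some ']' then '[' else '.')
        (acc ++ [PySem.Chars.slice s none (some ((j+1 : Nat) : Int))])
    else pvScanGo s j t acc

def is_path_changed_py_alt (path : String) (changed_paths : List String) : Bool :=
  let s := path.toList
  let ch := changed_paths.map String.toList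
  let prefixes0 := [s]
  let prefixes1 :=
    if s = [] then prefixes0
    else pvScanGo s (s.length - 1)
           (if PySem.List.pyGet? s (-1) = some ']' then '[' else '.') prefixes0
  let prefixes := prefixes1 ++ [[]]
  prefixes.any (fun p => ch.contains p)

-- ===== PRECONDITION & SPEC =====
def Spec_is_path_changed_py (path : String) (changed_paths : List String) (out : Bool) : Prop := out = is_path_changed_py_alt path changed_paths
instance (path : String) (changed_paths : List String) (out : Bool) : Decidable (Spec_is_path_changed_py path changed_paths out) := by unfold Spec_is_path_changed_py; infer_instance

-- ===== CLAIM (what is proved, stated in full; the proofs are below) =====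
def Claim_equal_is_path_changed_py : Prop := ∀ (path : String) (changed_paths : List String), Dom_is_path_changed_py path changed_paths → Spec_is_path_changed_py path changed_paths (is_path_changed_py path changed_paths)

-- ===== LEMMAS AND PROOFS =====

-- boolean abstraction of pvScanGo: 'was any collected prefix (beyond acc) in the set?'
def pvScanBool (ch : List (List Char)) (s : List Char) : Nat → Char → Bool
  | 0, _ => false
  | j+1, t =>
    if s[j+1]? = some t then
      (ch.contains (s.take (j+1)) || pvScanBool ch s j (if s[j]? = some ']' then '[' else '.'))
    else pvScanBool ch s j t

theorem pvScanGo_any (ch : List (List Char)) (s : List Char) : ∀ (i : Nat) (t : Char) (acc : List (List Char)),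
    (pvScanGo s i t acc).any (fun p => ch.contains p)
      = (acc.any (fun p => ch.contains p) || pvScanBool ch s i t) := by
  intro i
  induction i with
  | zero => intro t acc; simp [pvScanGo, pvScanBool]
  | succ j ih =>
    intro t acc
    have hget : PySem.List.pyGet? s ((j+1 : Nat) : Int) = s[j+1]? := PySem.List.pyGet?_natCast s (j+1)
    have hget' : PySem.List.pyGet? s ((j : Nat) : Int) = s[j]? := PySem.List.pyGet?_natCast s j
    have hsl : PySem.Chars.slice s none (some ((j+1 : Nat) : Int)) = s.take (j+1) := by
      simpa using PySem.List.slice_to_natCast s (j+1)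
    rw [pvScanGo, pvScanBool, hget, hget', hsl]
    split
    · rw [ih]
      simp [Bool.or_assoc]
    · rw [ih]

theorem pvScanBool_false (ch : List (List Char)) (s : List Char) (t : Char) :
    ∀ i : Nat, (∀ j, 1 ≤ j → j ≤ i → s[j]? ≠ some t) → pvScanBool ch s i t = false := by
  intro i
  induction i with
  | zero => intro _; rfl
  | succ j ih =>
    intro h
    rw [pvScanBool]
    have : ¬ s[j+1]? = some t := h (j+1) (by omega) (le_refl _)
    simp only [this, if_false]
    exact ih (fun j' h1 h2 => h j' h1 (by omega))

theorem pvScanBool_skip (ch : List (List Char)) (s : List Char) (t : Char) (m : Nat) :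
    ∀ i : Nat, m ≤ i → (∀ j, m < j → j ≤ i → s[j]? ≠ some t) →
      pvScanBool ch s i t = pvScanBool ch s m t := by
  intro i
  induction i with
  | zero =>
    intro hm _
    have : m = 0 := by omega
    rw [this]
  | succ j ih =>
    intro hm h
    rcases Nat.lt_or_ge m (j+1) with hlt | hge
    · rw [pvScanBool]
      have : ¬ s[j+1]? = some t := h (j+1) hlt (le_refl _)
      simp only [this, if_false]
      exact ih (by omega) (fun j' h1 h2 => h j' h1 (by omega))
    · have : m = j+1 := by omega
      rw [this]

theorem pv_endswith_single (s : List Char) (hc : s ≠ []) (x : Char) :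
    PySem.Chars.endswith s [x] = (s[s.length - 1]? == some x) := by
  rcases List.eq_nil_or_concat s with h | ⟨t, y, rfl⟩
  · exact absurd h hc
  · rw [Bool.eq_iff_iff, beq_iff_eq, PySem.Chars.endswith_iff]
    constructor
    · intro h
      rcases h with ⟨u, hu⟩
      have hy : y = x := by
        have := congrArg List.getLast? hu
        simpa using this.symm
      subst hy; simp
    · intro h
      simp at h
      simp [h]

-- the central bridge: A's while loop, started at the parent of s.take c, computes
-- exactly what B's scan computes from index c-1 (plus the final '' membership test)
theorem pv_main (ch : List (List Char)) (s : List Char) : ∀ c : Nat, 1 ≤ c → c ≤ s.length →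
    pvLoopA ch (pvParentPath (s.take c))
      = (pvScanBool ch s (c-1) (if s[c-1]? = some ']' then '[' else '.') || ch.contains []) := by
  intro c
  induction c using Nat.strong_induction_on with
  | _ c ih =>
    intro hc1 hcl
    set cur := s.take c with hcur
    have hlen : cur.length = c := by simp [hcur]; omega
    have hne : cur ≠ [] := by
      intro h; rw [h] at hlen; simp at hlen; omega
    have hidx : ∀ j : Nat, cur[j]? = if j < c then s[j]? else none := by
      intro j
      by_cases hj : j < c
      · simp [hcur, hj]
      · rw [if_neg hj]
        exact List.getElem?_eq_none (by rw [hlen]; omega)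
    have hend : PySem.Chars.endswith cur [']'] = (s[c-1]? == some ']') := by
      rw [pv_endswith_single cur hne, hlen, hidx (c-1), if_pos (by omega)]
    -- the two branches of _parent_path are symmetric; handle them uniformly
    rcases hcase : (s[c-1]? == some ']') with hv | hv
    · -- does not end with ']': cut character '.'
      rw [pvParentPath, if_neg hne, hend, hcase]
      simp only [Bool.false_eq_true, if_false]
      have hts : (if s[c-1]? = some ']' then '[' else '.') = '.' := by
        rw [if_neg]; intro h; rw [h] at hcase; simp at hcase
      rw [hts]
      rcases pv_rfind_single cur '.' with ⟨h1, h2⟩ | ⟨m, hm, he, hcc, hmax⟩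
      · rw [h1]
        simp only [show ¬ ((0:Int) ≤ -1) by norm_num, if_false]
        rw [pvLoopA]
        rw [dif_pos rfl]
        rw [pvScanBool_false ch s '.' (c-1) ?_]
        · simp
        · intro j h1j h2j heq
          exact h2 j (by rw [hidx j, if_pos (by omega)]; exact heq)
      · rw [hlen] at hm
        have hmll : m < s.length := by omega
        rw [he]
        rw [if_pos (by positivity)]
        rw [PySem.Chars.slice_eq_listSlice, PySem.List.slice_to _ (by positivity)]
        simp only [Int.toNat_natCast]
        have htake : cur.take m = s.take m := by
          rw [hcur, List.take_take]; congr 1; omega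
        have hsm : s[m]? = some '.' := by
          rw [hidx m, if_pos (by omega)] at hcc; exact hcc
      -- no occurrence of '.' strictly between m and c-1
        have hnone : ∀ j, m < j → j ≤ c-1 → s[j]? ≠ some '.' := by
          intro j h1j h2j heq
          exact hmax j h1j (by rw [hidx j, if_pos (by omega)]; exact heq)
        rcases Nat.eq_zero_or_pos m with hm0 | hm1
        · subst hm0
          rw [htake]
          simp only [List.take_zero]
          rw [pvLoopA]
          rw [dif_pos rfl]
          rw [pvScanBool_skip ch s '.' 0 (c-1) (by omega) hnone]
          simp [pvScanBool]
        · rw [htake]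
          have hmne : s.take m ≠ [] := by
            intro h
            have h2 := congrArg List.length h
            rw [List.length_take] at h2
            simp only [List.length_nil] at h2
            omega
          rw [pvLoopA]
          simp only [dif_neg hmne]
          rw [pvScanBool_skip ch s '.' m (c-1) (by omega) hnone]
          obtain ⟨m', rfl⟩ : ∃ m', m = m' + 1 := ⟨m - 1, by omega⟩
          rw [pvScanBool]
          rw [if_pos hsm]
          rw [ih (m'+1) (by omega) (by omega) (by omega)]
          simp only [Nat.add_sub_cancel]
          by_cases hmem : (List.take (m'+1) s) ∈ ch
          · simp [hmem]
          · simp [hmem, Bool.or_assoc]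
    · -- ends with ']': cut character '['
      rw [pvParentPath, if_neg hne, hend, hcase]
      simp only [if_true]
      have hts : (if s[c-1]? = some ']' then '[' else '.') = '[' := by
        rw [if_pos]; simpa using hcase
      rw [hts]
      rcases pv_rfind_single cur '[' with ⟨h1, h2⟩ | ⟨m, hm, he, hcc, hmax⟩
      · rw [h1]
        simp only [show ¬ ((0:Int) < -1) by norm_num, if_false]
        rw [pvLoopA]
        rw [dif_pos rfl]
        rw [pvScanBool_false ch s '[' (c-1) ?_]
        · simp
        · intro j h1j h2j heq
          exact h2 j (by rw [hidx j, if_pos (by omega)]; exact heq)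
      · rw [hlen] at hm
        have hmll : m < s.length := by omega
        rw [he]
        have hsm : s[m]? = some '[' := by
          rw [hidx m, if_pos (by omega)] at hcc; exact hcc
        have hnone : ∀ j, m < j → j ≤ c-1 → s[j]? ≠ some '[' := by
          intro j h1j h2j heq
          exact hmax j h1j (by rw [hidx j, if_pos (by omega)]; exact heq)
        rcases Nat.eq_zero_or_pos m with hm0 | hm1
        · subst hm0
          rw [if_neg (by norm_num)]
          rw [pvLoopA]
          rw [dif_pos rfl]
          rw [pvScanBool_skip ch s '[' 0 (c-1) (by omega) hnone]
          simp [pvScanBool]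
        · rw [if_pos (by exact_mod_cast hm1)]
          rw [PySem.Chars.slice_eq_listSlice, PySem.List.slice_to _ (by positivity)]
          simp only [Int.toNat_natCast]
          have htake : cur.take m = s.take m := by
            rw [hcur, List.take_take]; congr 1; omega
          rw [htake]
          have hmne : s.take m ≠ [] := by
            intro h
            have h2 := congrArg List.length h
            rw [List.length_take] at h2
            simp only [List.length_nil] at h2
            omega
          rw [pvLoopA]
          simp only [dif_neg hmne]
          rw [pvScanBool_skip ch s '[' m (c-1) (by omega) hnone]
          obtain ⟨m', rfl⟩ : ∃ m', m = m' + 1 := ⟨m - 1, by omega⟩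
          rw [pvScanBool]
          rw [if_pos hsm]
          rw [ih (m'+1) (by omega) (by omega) (by omega)]
          simp only [Nat.add_sub_cancel]
          by_cases hmem : (List.take (m'+1) s) ∈ ch
          · simp [hmem]
          · simp [hmem, Bool.or_assoc]

theorem pv_pyGet_neg_one (s : List Char) : PySem.List.pyGet? s (-1) = s[s.length - 1]? := by
  simp only [PySem.List.pyGet?, PySem.List.pyIdx?]
  norm_num
  split
  · simp
  · next h => cases s
              · simp
              · simp at h

-- ===== VERDICT (by name: the statement is the Claim_ definition above) =====
theorem is_path_changed_py_spec : Claim_equal_is_path_changed_py := by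
  intro path changed_paths _
  unfold Spec_is_path_changed_py
  unfold is_path_changed_py is_path_changed_py_alt
  set s := path.toList with hs
  set ch := changed_paths.map String.toList with hch
  by_cases hne : s = []
  · rw [hne]
    simp [pvParentPath, pvLoopA]
  · have hlen : 1 ≤ s.length := List.length_pos_of_ne_nil hne
    simp only [hne, if_neg, if_false]
    have htake : s.take s.length = s := List.take_length
    have := pv_main ch s s.length (by omega) (le_refl _)
    rw [htake] at this
    rw [pv_pyGet_neg_one s]
    rw [List.any_append, pvScanGo_any ch s (s.length - 1) _ [s]]
    rw [this]
    by_cases hmem : s ∈ ch <;> by_cases hemp : ([] : List Char) ∈ ch <;>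
      simp [hmem, hemp, Bool.or_assoc]
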